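-- pv_equiv track=rewrite | github.com/23A91A0514/GeeksForGeeks | Difficulty: Medium/Farthest Smaller Right/farthest-smaller-right.py | farMin
-- ===== SOURCE A (Python) =====
-- def farMin(arr):
--     n = len(arr)
--     result = [-1] * n
--
--     # Step 1: Preprocess right-side minimums
--     right_min = [0] * n
--     right_min[n - 1] = arr[n - 1]
--     for i in range(n - 2, -1, -1):
--         right_min[i] = min(arr[i], right_min[i + 1])
--
--     # Step 2: For each i, binary search for farthest j > i where arr[j] < arr[i]
--     for i in range(n):
--         low, high = i + 1, n - 1
--         idx = -1
--         while low <= high: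
--             mid = (low + high) // 2
--             if right_min[mid] < arr[i]:
--                 idx = mid  # Potential farthest found, but try farther
--                 low = mid + 1
--             else:
--                 high = mid - 1
--         result[i] = idx
--
--     return result
-- ===== SOURCE B (Python) =====
-- def farMin(arr):
--     n = len(arr)
--     res = []
--     for i in range(n):
--         j = n - 1
--         while j > i and arr[j] >= arr[i]:
--             j -= 1
--         res.append(j if j > i else -1)
--     return res
-- ===== Notes on version B (the rewrite author's own statement) =====
-- stated objective: simpler
-- what changed: B drops A's suffix-minimum preprocessing array and per-index binary search and instead, for each index, scans right-to-left for the first strictly smaller element.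
import Mathlib
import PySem

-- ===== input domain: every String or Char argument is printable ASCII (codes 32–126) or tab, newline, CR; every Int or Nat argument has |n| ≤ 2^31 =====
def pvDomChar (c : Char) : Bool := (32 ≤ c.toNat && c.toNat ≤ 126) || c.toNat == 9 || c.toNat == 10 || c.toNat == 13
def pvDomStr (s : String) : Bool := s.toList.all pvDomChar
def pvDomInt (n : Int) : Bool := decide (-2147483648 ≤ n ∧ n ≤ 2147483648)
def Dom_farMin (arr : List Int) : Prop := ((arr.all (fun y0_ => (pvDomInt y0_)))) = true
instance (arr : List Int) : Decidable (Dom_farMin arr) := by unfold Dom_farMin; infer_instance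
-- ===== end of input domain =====

-- B replaces A's suffix-minimum array + per-index binary search by a plain right-to-left
-- scan per index (simpler, not faster); A raises IndexError on [], excluded by Pre_.


-- ===== PORT A =====
-- right_min array: right_min[n-1] = arr[n-1]; for i in range(n-2,-1,-1): right_min[i] = min(arr[i], right_min[i+1])
-- (indices are in range under Pre_, so the total pyGetD/pySetD forms are exact there)
def farMinRM (arr : List Int) : List Int :=
  let n : Int := arr.length
  let rm0 := PySem.List.pySetD (List.replicate arr.length (0 : Int)) (n - 1)
               (PySem.List.pyGetD arr (n - 1) 0)
  (PySem.List.pyRange (n - 2) (-1) (-1)).foldl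
    (fun rm i =>
      PySem.List.pySetD rm i (min (PySem.List.pyGetD arr i 0) (PySem.List.pyGetD rm (i + 1) 0)))
    rm0

-- the while-loop of A's binary search, state (low, high, idx)
def farMinBS (rm : List Int) (v : Int) (low high idx : Int) : Int :=
  if h : low ≤ high then
    let mid := PySem.Int.floordiv (low + high) 2
    if PySem.List.pyGetD rm mid 0 < v then farMinBS rm v (mid + 1) high mid
    else farMinBS rm v low (mid - 1) idx
  else idx
termination_by (high + 1 - low).toNat
decreasing_by
  · have hb := PySem.Int.floordiv_two_mid_bounds h
    omega
  · have hb := PySem.Int.floordiv_two_mid_bounds h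
    omega

def farMin (arr : List Int) : List Int :=
  let n : Int := arr.length
  let result0 := List.replicate arr.length (-1 : Int)
  let rm := farMinRM arr
  (PySem.List.pyRange 0 n 1).foldl
    (fun result i =>
      PySem.List.pySetD result i (farMinBS rm (PySem.List.pyGetD arr i 0) (i + 1) (n - 1) (-1)))
    result0

-- ===== PORT B =====
-- B's inner while-loop: j walks left from n-1 while j > i and arr[j] >= arr[i]
def farMinScan (arr : List Int) (i v j : Int) : Int :=
  if h : i < j then
    if v ≤ PySem.List.pyGetD arr j 0 then farMinScan arr i v (j - 1) else j
  else -1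
termination_by (j - i).toNat
decreasing_by omega

def farMin_alt (arr : List Int) : List Int :=
  let n : Int := arr.length
  (PySem.List.pyRange 0 n 1).foldl
    (fun res i => res ++ [farMinScan arr i (PySem.List.pyGetD arr i 0) (n - 1)]) []

-- ===== PRECONDITION & SPEC =====
-- Pre_ excludes only the empty list, on which A raises IndexError (arr[n-1] = arr[-1]).
def Pre_farMin (arr : List Int) : Prop := arr ≠ []
instance (arr : List Int) : Decidable (Pre_farMin arr) := by unfold Pre_farMin; infer_instance
def pvWitness_farMin : List Int := ([3, 1, 4, 1, 2] : List Int)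

def Spec_farMin (arr : List Int) (out : List Int) : Prop := out = farMin_alt arr
instance (arr : List Int) (out : List Int) : Decidable (Spec_farMin arr out) := by unfold Spec_farMin; infer_instance

-- ===== CLAIM (what is proved, stated in full; the proofs are below) =====
def Claim_equal_farMin : Prop := ∀ (arr : List Int), Dom_farMin arr → Pre_farMin arr → Spec_farMin arr (farMin arr)


-- ===== LEMMAS AND PROOFS =====

-- pyGetD after pySetD, Int-index form (both indices nonnegative, set index in range)
theorem pvGetSet (xs : List Int) (i m v d : Int) (h0 : 0 ≤ i) (h1 : i < (xs.length : Int))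
    (hm : 0 ≤ m) :
    PySem.List.pyGetD (PySem.List.pySetD xs i v) m d
      = if m = i then v else PySem.List.pyGetD xs m d := by
  have hi : i = ((i.toNat : Nat) : Int) := by omega
  have hmm : m = ((m.toNat : Nat) : Int) := by omega
  rw [hi, hmm, PySem.List.pyGetD_pySetD_natCast xs i.toNat m.toNat v d (by omega)]
  split_ifs with h h' h'
  · rfl
  · exact absurd (by omega) h'
  · exact absurd (by omega) h
  · rfl

-- the invariant each cell of A's right_min array satisfies
def pvGood (arr rm : List Int) (m : Int) : Prop :=
  PySem.List.pyGetD rm m 0 =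
    if m = (arr.length : Int) - 1 then PySem.List.pyGetD arr m 0
    else min (PySem.List.pyGetD arr m 0) (PySem.List.pyGetD rm (m + 1) 0)

theorem pvRM_fold (arr : List Int) (t : Int) (rm : List Int)
    (hlen : rm.length = arr.length) (ht : t ≤ (arr.length : Int) - 2)
    (hyp : ∀ m : Int, t < m → m ≤ (arr.length : Int) - 1 → pvGood arr rm m) :
    (((PySem.List.pyRange t (-1) (-1)).foldl
        (fun rm i => PySem.List.pySetD rm i
          (min (PySem.List.pyGetD arr i 0) (PySem.List.pyGetD rm (i + 1) 0))) rm).length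
        = arr.length)
    ∧ (∀ m : Int, (0 ≤ m ∨ t < m) → m ≤ (arr.length : Int) - 1 →
        pvGood arr ((PySem.List.pyRange t (-1) (-1)).foldl
          (fun rm i => PySem.List.pySetD rm i
            (min (PySem.List.pyGetD arr i 0) (PySem.List.pyGetD rm (i + 1) 0))) rm) m) := by
  by_cases h : t ≤ -1
  · rw [PySem.List.pyRange_neg_one_eq_nil h]
    simp only [List.foldl_nil]
    exact ⟨hlen, fun m hm hm' => hyp m (by omega) hm'⟩
  · rw [PySem.List.pyRange_neg_one_cons (by omega : (-1 : Int) < t)]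
    simp only [List.foldl_cons]
    have hset := fun (mm : Int) (hmm : 0 ≤ mm) =>
      pvGetSet rm t mm (min (PySem.List.pyGetD arr t 0) (PySem.List.pyGetD rm (t + 1) 0)) 0
        (by omega) (by omega) hmm
    have hin : ∀ m : Int, t - 1 < m → m ≤ (arr.length : Int) - 1 →
        pvGood arr (PySem.List.pySetD rm t
          (min (PySem.List.pyGetD arr t 0) (PySem.List.pyGetD rm (t + 1) 0))) m := by
      intro m hm hm'
      rcases eq_or_lt_of_le (show t ≤ m by omega) with heq | hlt
      · -- m = t : the freshly written cell satisfies the recurrence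
        subst heq
        unfold pvGood
        rw [hset t (by omega), hset (t + 1) (by omega)]
        rw [if_neg (by omega : ¬ t + 1 = t), if_neg (by omega : ¬ t = (arr.length : Int) - 1)]
        simp
      · -- m > t : untouched cells keep their invariant
        have hG := hyp m hlt hm'
        unfold pvGood at hG ⊢
        rw [hset m (by omega), hset (m + 1) (by omega),
          if_neg (by omega : ¬ m = t), if_neg (by omega : ¬ m + 1 = t)]
        exact hG
    have IH := pvRM_fold arr (t - 1)
      (PySem.List.pySetD rm t (min (PySem.List.pyGetD arr t 0) (PySem.List.pyGetD rm (t + 1) 0)))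
      (by rw [PySem.List.length_pySetD]; exact hlen) (by omega) hin
    exact ⟨IH.1, fun m hm hm' => IH.2 m (hm.imp (fun x => x) (fun x => by omega)) hm'⟩
termination_by (t + 1).toNat
decreasing_by omega

theorem pvRM_spec (arr : List Int) (h : arr ≠ []) :
    (farMinRM arr).length = arr.length
    ∧ ∀ m : Int, 0 ≤ m → m ≤ (arr.length : Int) - 1 → pvGood arr (farMinRM arr) m := by
  have hn : 1 ≤ (arr.length : Int) := by
    have := List.length_pos_iff.mpr h; omega
  have hbase : ∀ m : Int, (arr.length : Int) - 2 < m → m ≤ (arr.length : Int) - 1 →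
      pvGood arr (PySem.List.pySetD (List.replicate arr.length (0 : Int))
        ((arr.length : Int) - 1) (PySem.List.pyGetD arr ((arr.length : Int) - 1) 0)) m := by
    intro m hm1 hm2
    have hm : m = (arr.length : Int) - 1 := by omega
    subst hm
    unfold pvGood
    rw [pvGetSet _ _ _ _ _ (by omega) (by simp) (by omega)]
    simp
  have := pvRM_fold arr ((arr.length : Int) - 2)
    (PySem.List.pySetD (List.replicate arr.length (0 : Int)) ((arr.length : Int) - 1)
      (PySem.List.pyGetD arr ((arr.length : Int) - 1) 0))
    (by rw [PySem.List.length_pySetD]; simp) (by omega) hbase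
  unfold farMinRM
  exact ⟨this.1, fun m hm hm' => this.2 m (Or.inl hm) hm'⟩

-- right_min[m] < v  ↔  some arr[k] with m ≤ k ≤ n-1 is < v
theorem pvRM_char (arr : List Int) (h : arr ≠ []) (v : Int) (m : Int)
    (h0 : 0 ≤ m) (h1 : m ≤ (arr.length : Int) - 1) :
    (PySem.List.pyGetD (farMinRM arr) m 0 < v ↔
      ∃ k : Int, m ≤ k ∧ k ≤ (arr.length : Int) - 1 ∧ PySem.List.pyGetD arr k 0 < v) := by
  have hG := (pvRM_spec arr h).2 m h0 h1
  unfold pvGood at hG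
  rcases eq_or_lt_of_le h1 with heq | hlt
  · rw [hG, if_pos heq]
    constructor
    · intro hv; exact ⟨m, le_refl m, h1, hv⟩
    · rintro ⟨k, hk1, hk2, hk3⟩
      have : k = m := by omega
      rwa [this] at hk3
  · rw [hG, if_neg (by omega)]
    have IH := pvRM_char arr h v (m + 1) (by omega) (by omega)
    rw [min_lt_iff, IH]
    constructor
    · rintro (ha | ⟨k, hk1, hk2, hk3⟩)
      · exact ⟨m, le_refl m, h1, ha⟩
      · exact ⟨k, by omega, hk2, hk3⟩
    · rintro ⟨k, hk1, hk2, hk3⟩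
      rcases eq_or_lt_of_le hk1 with heq2 | hlt2
      · subst heq2; exact Or.inl hk3
      · exact Or.inr ⟨k, by omega, hk2, hk3⟩
termination_by ((arr.length : Int) - 1 - m).toNat
decreasing_by omega

-- characterization of B's right-to-left scan: it returns the largest k in (i, j] with arr[k] < v, else -1
theorem pvScan_char (arr : List Int) (i v j : Int) :
    (farMinScan arr i v j = -1 ∧ ∀ k : Int, i < k → k ≤ j → ¬ PySem.List.pyGetD arr k 0 < v)
    ∨ (i < farMinScan arr i v j ∧ farMinScan arr i v j ≤ j
        ∧ PySem.List.pyGetD arr (farMinScan arr i v j) 0 < v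
        ∧ ∀ k : Int, farMinScan arr i v j < k → k ≤ j → ¬ PySem.List.pyGetD arr k 0 < v) := by
  by_cases h : i < j
  · by_cases hv : v ≤ PySem.List.pyGetD arr j 0
    · have IH := pvScan_char arr i v (j - 1)
      rw [farMinScan, dif_pos h, if_pos hv]
      rcases IH with ⟨h1, h2⟩ | ⟨h1, h2, h3, h4⟩
      · refine Or.inl ⟨h1, fun k hk1 hk2 => ?_⟩
        rcases eq_or_lt_of_le hk2 with heq | hlt
        · subst heq; omega
        · exact h2 k hk1 (by omega)
      · refine Or.inr ⟨h1, by omega, h3, fun k hk1 hk2 => ?_⟩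
        rcases eq_or_lt_of_le hk2 with heq | hlt
        · subst heq; omega
        · exact h4 k hk1 (by omega)
    · rw [farMinScan, dif_pos h, if_neg hv]
      exact Or.inr ⟨h, le_refl j, by omega, fun k hk1 hk2 => by omega⟩
  · rw [farMinScan, dif_neg h]
    exact Or.inl ⟨rfl, fun k hk1 hk2 => by omega⟩
termination_by (j - i).toNat
decreasing_by omega

-- A's binary search returns idx unchanged when nothing in [low, high] satisfies the test
theorem pvBS_none (rm : List Int) (v low high idx : Int)
    (hnone : ∀ m : Int, low ≤ m → m ≤ high → ¬ PySem.List.pyGetD rm m 0 < v) :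
    farMinBS rm v low high idx = idx := by
  by_cases h : low ≤ high
  · have hb := PySem.Int.floordiv_two_mid_bounds h
    rw [farMinBS, dif_pos h,
      if_neg (hnone (PySem.Int.floordiv (low + high) 2) (by omega) (by omega))]
    exact pvBS_none rm v low (PySem.Int.floordiv (low + high) 2 - 1) idx
      (fun m hm1 hm2 => hnone m hm1 (by omega))
  · rw [farMinBS, dif_neg h]
termination_by (high + 1 - low).toNat
decreasing_by omega

-- A's binary search finds the maximum M satisfying the (downward-closed) test
theorem pvBS_found (rm : List Int) (v M L H low high idx : Int)
    (hdc : ∀ a b : Int, L ≤ a → a ≤ b → b ≤ H →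
      PySem.List.pyGetD rm b 0 < v → PySem.List.pyGetD rm a 0 < v)
    (hM1 : PySem.List.pyGetD rm M 0 < v)
    (hMax : ∀ m : Int, M < m → m ≤ H → ¬ PySem.List.pyGetD rm m 0 < v)
    (h1 : L ≤ low) (h2 : low ≤ M) (h3 : M ≤ high) (h4 : high ≤ H) :
    farMinBS rm v low high idx = M := by
  have h : low ≤ high := by omega
  have hb := PySem.Int.floordiv_two_mid_bounds h
  rw [farMinBS, dif_pos h]
  by_cases hq : PySem.List.pyGetD rm (PySem.Int.floordiv (low + high) 2) 0 < v
  · rw [if_pos hq]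
    have hmidM : PySem.Int.floordiv (low + high) 2 ≤ M := by
      by_contra hc
      exact hMax (PySem.Int.floordiv (low + high) 2) (by omega) (by omega) hq
    rcases eq_or_lt_of_le hmidM with heq | hlt
    · rw [heq]
      exact pvBS_none rm v (M + 1) high M (fun m hm1 hm2 => hMax m (by omega) (by omega))
    · exact pvBS_found rm v M L H (PySem.Int.floordiv (low + high) 2 + 1) high
        (PySem.Int.floordiv (low + high) 2) hdc hM1 hMax (by omega) (by omega) h3 h4
  · rw [if_neg hq]
    have hMmid : M < PySem.Int.floordiv (low + high) 2 := by
      by_contra hc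
      exact hq (hdc (PySem.Int.floordiv (low + high) 2) M (by omega) (by omega) (by omega) hM1)
    exact pvBS_found rm v M L H low (PySem.Int.floordiv (low + high) 2 - 1) idx
      hdc hM1 hMax h1 h2 (by omega) (by omega)
termination_by (high + 1 - low).toNat
decreasing_by all_goals omega

-- the write-once loop over range(a, b) filling position i with f i
theorem pvSetFold (f : Int → Int) (b a : Int) (res : List Int)
    (h0 : 0 ≤ a) (hb : b ≤ (res.length : Int)) :
    (((PySem.List.pyRange a b 1).foldl
        (fun res i => PySem.List.pySetD res i (f i)) res).length = res.length)
    ∧ ∀ m : Int, 0 ≤ m → m < (res.length : Int) →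
        PySem.List.pyGetD ((PySem.List.pyRange a b 1).foldl
          (fun res i => PySem.List.pySetD res i (f i)) res) m 0
        = if a ≤ m ∧ m < b then f m else PySem.List.pyGetD res m 0 := by
  by_cases h : a < b
  · rw [PySem.List.pyRange_one_cons h]
    simp only [List.foldl_cons]
    have IH := pvSetFold f b (a + 1) (PySem.List.pySetD res a (f a)) (by omega)
      (by rw [PySem.List.length_pySetD]; exact hb)
    rw [PySem.List.length_pySetD] at IH
    refine ⟨IH.1, fun m hm0 hm1 => ?_⟩
    rw [IH.2 m hm0 hm1, pvGetSet res a m (f a) 0 h0 (by omega) hm0]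
    split_ifs <;> first | rfl | omega | simp_all
  · rw [PySem.List.pyRange_one_eq_nil (by omega)]
    simp only [List.foldl_nil]
    exact ⟨by simp, fun m hm0 hm1 => by rw [if_neg (by omega)]⟩
termination_by (b - a).toNat
decreasing_by omega

-- per-index agreement: the binary search over right_min equals the direct scan
theorem pvIndex_eq (arr : List Int) (h : arr ≠ []) (i : Int) (h0 : 0 ≤ i) :
    farMinBS (farMinRM arr) (PySem.List.pyGetD arr i 0) (i + 1) ((arr.length : Int) - 1) (-1)
      = farMinScan arr i (PySem.List.pyGetD arr i 0) ((arr.length : Int) - 1) := by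
  set v := PySem.List.pyGetD arr i 0 with hv
  have hchar := fun (m : Int) (a : 0 ≤ m) (b : m ≤ (arr.length : Int) - 1) =>
    pvRM_char arr h v m a b
  rcases pvScan_char arr i v ((arr.length : Int) - 1) with ⟨hs, hnone⟩ | ⟨ha, hb, hc, hd⟩
  · rw [hs]
    refine pvBS_none (farMinRM arr) v (i + 1) ((arr.length : Int) - 1) (-1) ?_
    intro m hm1 hm2 hq
    rcases (hchar m (by omega) hm2).mp hq with ⟨k, hk1, hk2, hk3⟩
    exact hnone k (by omega) hk2 hk3
  · refine pvBS_found (farMinRM arr) v (farMinScan arr i v ((arr.length : Int) - 1))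
      (i + 1) ((arr.length : Int) - 1) (i + 1) ((arr.length : Int) - 1) (-1)
      ?_ ?_ ?_ (le_refl _) (by omega) hb (le_refl _)
    · intro a b ha1 ha2 ha3 hqb
      rcases (hchar b (by omega) ha3).mp hqb with ⟨k, hk1, hk2, hk3⟩
      exact (hchar a (by omega) (by omega)).mpr ⟨k, by omega, hk2, hk3⟩
    · exact (hchar _ (by omega) hb).mpr ⟨_, le_refl _, hb, hc⟩
    · intro m hm1 hm2 hq
      rcases (hchar m (by omega) hm2).mp hq with ⟨k, hk1, hk2, hk3⟩
      exact hd k (by omega) hk2 hk3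

theorem farMin_main (arr : List Int) (h : arr ≠ []) : farMin arr = farMin_alt arr := by
  have hn1 : 1 ≤ (arr.length : Int) := by
    have := List.length_pos_iff.mpr h; omega
  unfold farMin farMin_alt
  rw [PySem.List.foldl_append_singleton_eq_map
    (fun i => farMinScan arr i (PySem.List.pyGetD arr i 0) ((arr.length : Int) - 1))]
  simp only [List.nil_append]
  have hA := pvSetFold
    (fun i => farMinBS (farMinRM arr) (PySem.List.pyGetD arr i 0) (i + 1)
      ((arr.length : Int) - 1) (-1))
    (arr.length : Int) 0 (List.replicate arr.length (-1 : Int)) (by omega) (by simp)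
  beta_reduce at hA
  simp only [List.length_replicate] at hA
  apply List.ext_getElem
  · rw [hA.1]
    simp [PySem.List.length_pyRange_one]
  · intro k hk1 hk2
    have hkn : (k : Int) < (arr.length : Int) := by
      rw [hA.1] at hk1; exact_mod_cast hk1
    have hL := hA.2 (k : Int) (by omega) hkn
    rw [if_pos ⟨by omega, hkn⟩] at hL
    rw [PySem.List.pyGetD_eq_getElem _ (0 : Int) (by omega)
      (by rw [hA.1]; exact_mod_cast hkn)] at hL
    simp only [Int.toNat_natCast] at hL
    rw [List.getElem_map, PySem.List.getElem_pyRange_one]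
    simp only [zero_add]
    exact hL.trans (pvIndex_eq arr h (k : Int) (by omega))

-- ===== VERDICT (by name: the statement is the Claim_ definition above) =====
theorem farMin_spec : Claim_equal_farMin := by
  intro arr _ hpre
  exact farMin_main arr hpre
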